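-- pv_equiv track=rewrite | github.com/LiarPrincess/Oh-my-decimal | Scripts/generate-tests/speleotrove_dectest/write_test.py | _encode_decimal_payload
-- ===== SOURCE A (Python) =====
-- def _encode_decimal_payload(arg: str) -> str:
--     arg_lower = arg.lower()
--
--     for p in ("nan", "+nan", "-nan", "snan", "+snan", "-snan"):
--         if arg_lower.startswith(p):
--             p_len = len(p)
--             nan = arg[:p_len]
--             payload_str = arg[p_len:]
--
--             if payload_str != "":
--                 payload_int = int(payload_str)
--                 payload_hex = hex(payload_int)
--                 arg = nan + "(" + payload_hex + ")"
--
--             break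
--
--     return arg
-- ===== SOURCE B (Python) =====
-- def _encode_decimal_payload(arg: str) -> str:
--     low = arg.lower()
--     i = 0
--     if i < len(low) and low[i] in "+-":
--         i += 1
--     if i < len(low) and low[i] == "s":
--         i += 1
--     if low[i:i + 3] != "nan":
--         return arg
--     end = i + 3
--     payload_str = arg[end:]
--     if payload_str == "":
--         return arg
--     return arg[:end] + "(" + hex(int(payload_str)) + ")"
-- ===== Notes on version B (the rewrite author's own statement) =====
-- stated objective: simpler
-- what changed: A tries six NaN prefix literals in a loop with break; B parses the prefix character by character (optional sign, optional 's', then 'nan') and then applies the same payload-to-hex tail.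
import Mathlib
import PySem

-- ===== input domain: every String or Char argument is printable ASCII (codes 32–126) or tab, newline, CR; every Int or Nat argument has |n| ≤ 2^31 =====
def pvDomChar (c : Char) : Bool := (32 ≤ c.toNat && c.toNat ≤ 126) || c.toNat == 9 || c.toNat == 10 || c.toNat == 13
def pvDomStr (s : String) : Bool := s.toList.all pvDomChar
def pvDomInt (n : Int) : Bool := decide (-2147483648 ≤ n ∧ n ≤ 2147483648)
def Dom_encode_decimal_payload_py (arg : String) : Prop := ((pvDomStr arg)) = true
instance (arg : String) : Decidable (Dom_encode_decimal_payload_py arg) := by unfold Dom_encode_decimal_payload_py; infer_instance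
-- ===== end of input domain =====

-- B replaces A's loop over six prefix literals by a direct character-level parse
-- (optional sign, optional 's', then "nan"); objective: simpler, same cost.

-- shared builtin: Python's hex(n)
def pyHex (n : Int) : String :=
  if n < 0 then "-0x" ++ String.ofList (Nat.toDigits 16 n.natAbs)
  else "0x" ++ String.ofList (Nat.toDigits 16 n.toNat)

-- ===== PORT A =====
-- the for-loop with break: the first matching prefix wins
def encA_loop (arg lw : String) : List String → String
  | [] => arg
  | p :: ps =>
    if PySem.Str.startswith lw p then
      let pLen := PySem.Str.len p
      let nan := PySem.Str.slice arg none (some pLen)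
      let payload := PySem.Str.slice arg (some pLen) none
      if payload ≠ "" then
        -- int(payload) raises ValueError when ofStr? = none: excluded by Pre_
        nan ++ "(" ++ pyHex ((PySem.Int.ofStr? payload).getD 0) ++ ")"
      else arg
    else encA_loop arg lw ps

def encode_decimal_payload_py (arg : String) : String :=
  encA_loop arg (PySem.Str.lower arg) ["nan", "+nan", "-nan", "snan", "+snan", "-snan"]

-- ===== PORT B =====
def encode_decimal_payload_py_alt (arg : String) : String :=
  let low := (PySem.Str.lower arg).toList
  let i1 : Nat := if 0 < low.length ∧ (low.getD 0 ' ' = '+' ∨ low.getD 0 ' ' = '-') then 1 else 0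
  let i2 : Nat := if i1 < low.length ∧ low.getD i1 ' ' = 's' then i1 + 1 else i1
  if (low.drop i2).take 3 ≠ "nan".toList then arg
  else
    let payload := PySem.Str.slice arg (some ((i2 + 3 : Nat) : Int)) none
    if payload = "" then arg
    else
      -- int(payload) raises ValueError when ofStr? = none: excluded by Pre_
      PySem.Str.slice arg none (some ((i2 + 3 : Nat) : Int)) ++ "(" ++
        pyHex ((PySem.Int.ofStr? payload).getD 0) ++ ")"

-- ===== PRECONDITION & SPEC =====
-- length of the NaN prefix matched by A's loop (none = no match)
def nanEnd (L : List Char) : Option Nat :=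
  if PySem.Chars.startswith L "nan".toList then some 3
  else if PySem.Chars.startswith L "+nan".toList then some 4
  else if PySem.Chars.startswith L "-nan".toList then some 4
  else if PySem.Chars.startswith L "snan".toList then some 4
  else if PySem.Chars.startswith L "+snan".toList then some 5
  else if PySem.Chars.startswith L "-snan".toList then some 5
  else none

-- Pre_ excludes exactly the inputs on which a NaN prefix matches and the non-empty
-- remainder is not a valid int literal: there Python A raises ValueError (so does B).
def Pre_encode_decimal_payload_py (arg : String) : Prop :=
  ((nanEnd (PySem.Str.lower arg).toList).all fun e =>
     (PySem.Str.slice arg (some (e : Int)) none == "") ||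
     (PySem.Int.ofStr? (PySem.Str.slice arg (some (e : Int)) none)).isSome) = true

instance (arg : String) : Decidable (Pre_encode_decimal_payload_py arg) := by
  unfold Pre_encode_decimal_payload_py; infer_instance

def pvWitness_encode_decimal_payload_py : String := "-sNaN255"

def Spec_encode_decimal_payload_py (arg : String) (out : String) : Prop := out = encode_decimal_payload_py_alt arg
instance (arg : String) (out : String) : Decidable (Spec_encode_decimal_payload_py arg out) := by unfold Spec_encode_decimal_payload_py; infer_instance

-- ===== CLAIM (what is proved, stated in full; the proofs are below) =====
def Claim_equal_encode_decimal_payload_py : Prop := ∀ (arg : String), Dom_encode_decimal_payload_py arg → Pre_encode_decimal_payload_py arg → Spec_encode_decimal_payload_py arg (encode_decimal_payload_py arg)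

-- ===== LEMMAS AND PROOFS =====

-- the common tail both programs perform once the prefix end `e` is known
def emit (arg : String) (e : Nat) : String :=
  let payload := PySem.Str.slice arg (some (e : Int)) none
  if payload = "" then arg
  else PySem.Str.slice arg none (some (e : Int)) ++ "(" ++
    pyHex ((PySem.Int.ofStr? payload).getD 0) ++ ")"

lemma encA_eq (arg : String) :
    encode_decimal_payload_py arg
      = (nanEnd (PySem.Str.lower arg).toList).elim arg (emit arg) := by
  have h3 : PySem.Str.len "nan" = ((3 : Nat) : Int) := by decide
  have h4a : PySem.Str.len "+nan" = ((4 : Nat) : Int) := by decide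
  have h4b : PySem.Str.len "-nan" = ((4 : Nat) : Int) := by decide
  have h4c : PySem.Str.len "snan" = ((4 : Nat) : Int) := by decide
  have h5a : PySem.Str.len "+snan" = ((5 : Nat) : Int) := by decide
  have h5b : PySem.Str.len "-snan" = ((5 : Nat) : Int) := by decide
  unfold encode_decimal_payload_py
  simp only [encA_loop, h3, h4a, h4b, h4c, h5a, h5b, PySem.Str.startswith_eq, nanEnd]
  split_ifs <;> simp_all [emit]

-- B's character-level end computation agrees with A's six-prefix dispatch
set_option maxHeartbeats 1000000 in
lemma end_eq (L : List Char) :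
    (let i1 : Nat := if 0 < L.length ∧ (L.getD 0 ' ' = '+' ∨ L.getD 0 ' ' = '-') then 1 else 0
     let i2 : Nat := if i1 < L.length ∧ L.getD i1 ' ' = 's' then i1 + 1 else i1
     if (L.drop i2).take 3 = "nan".toList then some (i2 + 3) else none)
      = nanEnd L := by
  rcases L with _ | ⟨c0, (_ | ⟨c1, (_ | ⟨c2, (_ | ⟨c3, (_ | ⟨c4, rest⟩)⟩)⟩)⟩)⟩ <;>
    simp only [nanEnd, PySem.Chars.startswith] <;>
    split_ifs <;> simp_all <;> simp_all [eq_comm]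

lemma encB_eq (arg : String) :
    encode_decimal_payload_py_alt arg
      = (nanEnd (PySem.Str.lower arg).toList).elim arg (emit arg) := by
  unfold encode_decimal_payload_py_alt
  rw [← end_eq ((PySem.Str.lower arg).toList)]
  generalize (PySem.Str.lower arg).toList = L
  by_cases hA : 0 < L.length ∧ (L.getD 0 ' ' = '+' ∨ L.getD 0 ' ' = '-')
  · simp only [if_pos hA]
    by_cases hB : 1 < L.length ∧ L.getD 1 ' ' = 's'
    · simp only [if_pos hB]
      by_cases hC : List.take 3 (List.drop 2 L) = ['n','a','n']
      · simp [hC, emit]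
      · simp [hC]
    · simp only [if_neg hB]
      by_cases hC : List.take 3 L.tail = ['n','a','n']
      · simp [hC, emit]
      · simp [hC]
  · simp only [if_neg hA]
    by_cases hB : 0 < L.length ∧ L.getD 0 ' ' = 's'
    · simp only [if_pos hB]
      by_cases hC : List.take 3 L.tail = ['n','a','n']
      · simp [hC, emit]
      · simp [hC]
    · simp only [if_neg hB]
      by_cases hC : List.take 3 L = ['n','a','n']
      · simp [hC, emit]
      · simp [hC]

-- ===== VERDICT (by name: the statement is the Claim_ definition above) =====
theorem encode_decimal_payload_py_spec : Claim_equal_encode_decimal_payload_py := by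
  intro arg _ _
  unfold Spec_encode_decimal_payload_py
  rw [encA_eq, encB_eq]
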